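-- pv_equiv track=rewrite | github.com/nasifayc/competitive-programming | codeforce/balaced_team.py | max_balanced_team_size
-- ===== SOURCE A (Python) =====
-- def max_balanced_team_size(n, skills):
--
--     skills.sort()
--
--     max_size = 0
--     left = 0
--
--     for right in range(n):
--
--         while skills[right] - skills[left] > 5:
--             left += 1
--
--
--         max_size = max(max_size, right - left + 1)
--
--     return max_size
-- ===== SOURCE B (Python) =====
-- import bisect
--
-- def max_balanced_team_size(n, skills):
--     skills.sort()
--     max_size = 0
--     for right in range(n):
--         left = bisect.bisect_left(skills, skills[right] - 5)
--         max_size = max(max_size, right - left + 1)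
--     return max_size
-- ===== Notes on version B (the rewrite author's own statement) =====
-- stated objective: idiomatic
-- what changed: Replaces the two-pointer loop with its carried left state by a stateless binary search: for each right, bisect_left finds the first index within range 5, so no left pointer is threaded between iterations.
import Mathlib
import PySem

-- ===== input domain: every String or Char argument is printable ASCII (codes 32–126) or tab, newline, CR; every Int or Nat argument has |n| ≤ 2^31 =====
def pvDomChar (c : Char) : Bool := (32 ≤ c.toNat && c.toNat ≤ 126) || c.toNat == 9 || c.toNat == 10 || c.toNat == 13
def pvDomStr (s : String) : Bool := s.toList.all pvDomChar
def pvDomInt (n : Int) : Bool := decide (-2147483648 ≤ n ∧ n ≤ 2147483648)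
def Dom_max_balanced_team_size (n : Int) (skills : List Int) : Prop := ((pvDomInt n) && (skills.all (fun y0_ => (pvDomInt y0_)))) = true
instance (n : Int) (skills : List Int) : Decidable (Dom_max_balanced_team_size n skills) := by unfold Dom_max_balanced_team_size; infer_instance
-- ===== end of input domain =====

-- B replaces A's stateful two-pointer scan by a per-index bisect_left binary search (idiomatic, same cost);
-- both A and B sort `skills` in place, the theorems are about the return value.

-- ===== PORT A =====
-- the `while skills[right] - skills[left] > 5: left += 1` loop; fuel = s.length suffices under Pre_
def pvWhileA (s : List Int) (r : Int) (left : Int) : Nat → Int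
  | 0 => left
  | fuel + 1 =>
    if PySem.List.pyGetD s r 0 - PySem.List.pyGetD s left 0 > 5 then
      pvWhileA s r (left + 1) fuel
    else left

def max_balanced_team_size (n : Int) (skills : List Int) : Int :=
  let s := PySem.List.sorted skills (fun x => x) false
  let res := (PySem.List.pyRange 0 n 1).foldl
    (fun (st : Int × Int) r =>
      let left := pvWhileA s r st.2 s.length
      (max st.1 (r - left + 1), left)) (0, 0)
  res.1

-- ===== PORT B =====
def max_balanced_team_size_alt (n : Int) (skills : List Int) : Int :=
  let s := PySem.List.sorted skills (fun x => x) false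
  (PySem.List.pyRange 0 n 1).foldl
    (fun m r =>
      max m (r - (PySem.List.bisectLeft s (PySem.List.pyGetD s r 0 - 5) : Int) + 1)) 0

-- ===== PRECONDITION & SPEC =====
-- Pre_: Python A indexes skills[right] for right in range(n), so n > len(skills) raises IndexError; n ≤ 0 is fine (empty range).
def Pre_max_balanced_team_size (n : Int) (skills : List Int) : Prop := n ≤ (skills.length : Int)
instance (n : Int) (skills : List Int) : Decidable (Pre_max_balanced_team_size n skills) := by unfold Pre_max_balanced_team_size; infer_instance
def pvWitness_max_balanced_team_size : Int × List Int := (4, [9, 1, 7, 3])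

def Spec_max_balanced_team_size (n : Int) (skills : List Int) (out : Int) : Prop := out = max_balanced_team_size_alt n skills
instance (n : Int) (skills : List Int) (out : Int) : Decidable (Spec_max_balanced_team_size n skills out) := by unfold Spec_max_balanced_team_size; infer_instance

-- ===== CLAIM (what is proved, stated in full; the proofs are below) =====
def Claim_equal_max_balanced_team_size : Prop := ∀ (n : Int) (skills : List Int), Dom_max_balanced_team_size n skills → Pre_max_balanced_team_size n skills → Spec_max_balanced_team_size n skills (max_balanced_team_size n skills)

-- ===== LEMMAS AND PROOFS =====

-- sorted access: for 0 ≤ i ≤ j < len, s[i] ≤ s[j]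
theorem pv_sorted_le {s : List Int} (hs : s.Pairwise (· ≤ ·)) {i j : Nat}
    (hij : i ≤ j) (hj : j < s.length) : s[i]'(lt_of_le_of_lt hij hj) ≤ s[j] := by
  rcases lt_or_eq_of_le hij with h | h
  · exact (List.pairwise_iff_getElem.mp hs) i j (lt_of_le_of_lt hij hj) hj h
  · subst h; rfl

-- bisectLeft (s[r]-5) lands at or before r
theorem pv_bisect_le_r {s : List Int} (hs : s.Pairwise (· ≤ ·)) {r : Nat} (hr : r < s.length) :
    PySem.List.bisectLeft s (s[r] - 5) ≤ r := by
  by_contra h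
  rw [not_le] at h
  have h2 := (PySem.List.bisectLeft_spec s (s[r] - 5) hs).2.1 r hr h
  omega

-- bisectLeft is monotone in the target
theorem pv_bisect_mono {s : List Int} (hs : s.Pairwise (· ≤ ·)) {x y : Int} (hxy : x ≤ y) :
    PySem.List.bisectLeft s x ≤ PySem.List.bisectLeft s y := by
  by_contra h
  rw [not_le] at h
  have hby := (PySem.List.bisectLeft_spec s y hs)
  have hbx := (PySem.List.bisectLeft_spec s x hs)
  have hlt : PySem.List.bisectLeft s y < s.length := lt_of_lt_of_le h hbx.1
  have h1 := hbx.2.1 _ hlt h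
  have h2 := hby.2.2 _ hlt (le_refl _)
  omega

-- A's while loop reaches exactly the bisect_left index
theorem pv_while_eq_bisect {s : List Int} (hs : s.Pairwise (· ≤ ·)) {r : Nat} (hr : r < s.length)
    (fuel : Nat) (left : Int) (h0 : 0 ≤ left)
    (hle : left ≤ (PySem.List.bisectLeft s (s[r] - 5) : Int))
    (hfuel : ((PySem.List.bisectLeft s (s[r] - 5) : Int) - left).toNat ≤ fuel) :
    pvWhileA s (r : Int) left fuel = (PySem.List.bisectLeft s (s[r] - 5) : Int) := by
  induction fuel generalizing left with
  | zero =>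
    simp only [pvWhileA]
    omega
  | succ fuel ih =>
    have hb := PySem.List.bisectLeft_spec s (s[r] - 5) hs
    have hbr : PySem.List.bisectLeft s (s[r] - 5) ≤ r := pv_bisect_le_r hs hr
    have hgr : PySem.List.pyGetD s (r : Int) 0 = s[r] := by
      rw [PySem.List.pyGetD_eq_getElem s 0 (Int.natCast_nonneg r) (by exact_mod_cast hr)]
      simp
    rcases lt_or_eq_of_le hle with hlt | heq
    · -- left < bisect: condition holds, advance
      have hlin : left.toNat < s.length := by omega
      have hcond : s[left.toNat] < s[r] - 5 := hb.2.1 left.toNat hlin (by omega)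
      have hgl : PySem.List.pyGetD s left 0 = s[left.toNat] := by
        rw [PySem.List.pyGetD_eq_getElem s 0 h0 (by omega)]
      simp only [pvWhileA, hgr, hgl, if_pos (by omega : s[r] - s[left.toNat] > 5)]
      exact ih (left + 1) (by omega) (by omega) (by omega)
    · -- left = bisect: condition fails
      have hlin : left.toNat < s.length := by omega
      have hcond : s[r] - 5 ≤ s[left.toNat] := hb.2.2 left.toNat hlin (by omega)
      have hgl : PySem.List.pyGetD s left 0 = s[left.toNat] := by
        rw [PySem.List.pyGetD_eq_getElem s 0 h0 (by omega)]
      simp only [pvWhileA, hgr, hgl, if_neg (by omega : ¬ s[r] - s[left.toNat] > 5)]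
      exact heq

-- the two folds agree, carrying A's left-pointer invariant
theorem pv_fold_eq {s : List Int} (hs : s.Pairwise (· ≤ ·)) (n : Int) (hn : n ≤ (s.length : Int)) :
    ∀ (k : Nat) (j accA accB left : Int), 0 ≤ j → (n - j).toNat ≤ k → accA = accB → 0 ≤ left →
    (j < n → left ≤ (PySem.List.bisectLeft s (PySem.List.pyGetD s j 0 - 5) : Int)) →
    ((PySem.List.pyRange j n 1).foldl
      (fun (st : Int × Int) r =>
        let l := pvWhileA s r st.2 s.length
        (max st.1 (r - l + 1), l)) (accA, left)).1
    = (PySem.List.pyRange j n 1).foldl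
      (fun m r => max m (r - (PySem.List.bisectLeft s (PySem.List.pyGetD s r 0 - 5) : Int) + 1)) accB := by
  intro k
  induction k with
  | zero =>
    intro j accA accB left hj hk hacc _ _
    rw [PySem.List.pyRange_one_eq_nil (by omega)]
    simpa using hacc
  | succ k ih =>
    intro j accA accB left hj hk hacc hl0 hinv
    by_cases hjn : j < n
    · have hjlen : j.toNat < s.length := by omega
      rw [PySem.List.pyRange_one_cons hjn]
      simp only [List.foldl_cons]
      have hgj : PySem.List.pyGetD s j 0 = s[j.toNat] := by
        rw [PySem.List.pyGetD_eq_getElem s 0 hj (by omega)]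
      have hinv' : left ≤ (PySem.List.bisectLeft s (s[j.toNat] - 5) : Int) := by
        rw [← hgj]; exact hinv hjn
      have hbr : PySem.List.bisectLeft s (s[j.toNat] - 5) ≤ j.toNat := pv_bisect_le_r hs hjlen
      have hwj : pvWhileA s j left s.length = (PySem.List.bisectLeft s (s[j.toNat] - 5) : Int) := by
        have := pv_while_eq_bisect hs hjlen s.length left hl0 hinv' (by omega)
        simpa [Int.toNat_of_nonneg hj] using this
      rw [hgj, hwj]
      apply ih (j + 1) _ _ _ (by omega) (by omega)
      · rw [hacc]
      · omega
      · intro hj1n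
        have hj1len : (j + 1).toNat < s.length := by omega
        have hgj1 : PySem.List.pyGetD s (j + 1) 0 = s[(j+1).toNat] := by
          rw [PySem.List.pyGetD_eq_getElem s 0 (by omega) (by omega)]
        have hmono : s[j.toNat] ≤ s[(j+1).toNat] :=
          pv_sorted_le hs (by omega) hj1len
        have := pv_bisect_mono hs (show s[j.toNat] - 5 ≤ s[(j+1).toNat] - 5 by omega)
        rw [hgj1]
        omega
    · rw [PySem.List.pyRange_one_eq_nil (by omega)]
      simpa using hacc

-- ===== VERDICT (by name: the statement is the Claim_ definition above) =====
theorem max_balanced_team_size_spec : Claim_equal_max_balanced_team_size := by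
  intro n skills _ hpre
  unfold Spec_max_balanced_team_size max_balanced_team_size max_balanced_team_size_alt
  have hs : (PySem.List.sorted skills (fun x => x) false).Pairwise (· ≤ ·) :=
    PySem.List.sorted_pairwise skills (fun x => x)
  have hlen : (PySem.List.sorted skills (fun x => x) false).length = skills.length :=
    PySem.List.length_sorted skills (fun x => x) false
  exact pv_fold_eq hs n (by unfold Pre_max_balanced_team_size at hpre; omega)
    n.toNat 0 0 0 0 (le_refl 0) (by omega) rfl (le_refl 0) (fun _ => by positivity)
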